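-- pv_equiv track=rewrite | github.com/AtharvaC5i/documentation-agent | brd-agent/backend/pipelines/document_pipeline.py | _estimate_pages
-- ===== SOURCE A (Python) =====
-- def _estimate_pages(sections):
--     page = 3
--     result = []
--     for s in sections:
--         result.append(page)
--         words = len(s.get("content", "").split())
--         page += max(1, round(words / 320))
--     return result
-- ===== SOURCE B (Python) =====
-- def _estimate_pages(sections):
--     # Right-to-left: each section contributes its start page 3 and shifts every
--     # later section's page by its own increment; no running page accumulator.
--     pages = []
--     for s in reversed(sections):
--         inc = max(1, round(len(s.get("content", "").split()) / 320))
--         pages = [3] + [p + inc for p in pages]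
--     return pages
-- ===== Notes on version B (the rewrite author's own statement) =====
-- stated objective: alternative
-- what changed: B traverses the sections right-to-left with no running page counter: each section prepends its own base page 3 and shifts all already-computed later pages by its increment, instead of A's left-to-right accumulator loop; it trades O(n) for O(n^2) list shifting.
import Mathlib
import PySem

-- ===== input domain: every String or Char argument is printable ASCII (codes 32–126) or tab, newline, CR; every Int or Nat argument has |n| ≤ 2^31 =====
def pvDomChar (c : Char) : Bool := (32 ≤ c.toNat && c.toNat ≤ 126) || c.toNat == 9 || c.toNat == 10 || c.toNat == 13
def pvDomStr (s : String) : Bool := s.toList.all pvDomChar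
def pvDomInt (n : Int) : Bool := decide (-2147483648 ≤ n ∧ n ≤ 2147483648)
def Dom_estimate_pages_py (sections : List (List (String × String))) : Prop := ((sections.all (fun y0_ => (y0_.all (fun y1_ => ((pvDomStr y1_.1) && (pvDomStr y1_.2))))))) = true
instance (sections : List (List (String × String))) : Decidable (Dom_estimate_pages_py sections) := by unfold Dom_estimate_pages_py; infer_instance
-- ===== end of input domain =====

-- B traverses sections right-to-left with no running page counter: each section prepends
-- its base page 3 and shifts all later pages by its own increment (alternative decomposition).

-- round(n / 320) for a Nat n: exact for Python's float round-half-to-even on this domain,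
-- since n/320 lands exactly on a tie iff n % 320 = 160 and word counts are far below 2^44.
def pvRound320 (n : Nat) : Int :=
  let q := n / 320
  let r := n % 320
  if r < 160 then q else if r > 160 then q + 1 else if q % 2 = 0 then q else q + 1

-- max(1, round(len(s.get("content", "").split()) / 320)) — the per-section increment both Pythons compute
def pvWordInc (s : List (String × String)) : Int :=
  max 1 (pvRound320 (PySem.Str.split₀ ((PySem.Dict.mk s).getD "content" "")).length)

-- ===== PORT A =====
-- A's loop: append current page, then advance it by the section's increment.
def epGoA : List (List (String × String)) → Int → List Int
  | [], _ => []
  | s :: rest, page => page :: epGoA rest (page + pvWordInc s)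

def estimate_pages_py (sections : List (List (String × String))) : List Int :=
  epGoA sections 3

-- ===== PORT B =====
-- B's loop over reversed(sections): pages = [3] + [p + inc for p in pages], i.e. a right fold.
def estimate_pages_py_alt (sections : List (List (String × String))) : List Int :=
  sections.foldr (fun s pages => 3 :: pages.map (fun p => p + pvWordInc s)) []

-- ===== PRECONDITION & SPEC =====
def Spec_estimate_pages_py (sections : List (List (String × String))) (out : List Int) : Prop := out = estimate_pages_py_alt sections
instance (sections : List (List (String × String))) (out : List Int) : Decidable (Spec_estimate_pages_py sections out) := by unfold Spec_estimate_pages_py; infer_instance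

-- ===== CLAIM (what is proved, stated in full; the proofs are below) =====
def Claim_equal_estimate_pages_py : Prop := ∀ (sections : List (List (String × String))), Dom_estimate_pages_py sections → Spec_estimate_pages_py sections (estimate_pages_py sections)

-- ===== LEMMAS AND PROOFS =====
theorem epGoA_eq_foldr_shift (l : List (List (String × String))) (page : Int) :
    epGoA l page =
      (l.foldr (fun s pages => 3 :: pages.map (fun p => p + pvWordInc s)) []).map
        (fun p => p + (page - 3)) := by
  induction l generalizing page with
  | nil => simp [epGoA]
  | cons s rest ih =>
      simp only [epGoA, List.foldr_cons, List.map_cons, List.map_map]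
      rw [ih (page + pvWordInc s)]
      congr 1
      · omega
      · congr 1
        funext x
        simp [Function.comp]
        ring

-- ===== VERDICT (by name: the statement is the Claim_ definition above) =====
theorem estimate_pages_py_spec : Claim_equal_estimate_pages_py := by
  intro sections _
  unfold Spec_estimate_pages_py estimate_pages_py estimate_pages_py_alt
  rw [epGoA_eq_foldr_shift]
  simp
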